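-- pv_equiv track=rewrite | github.com/daalgi/algorithms | arrays/max_num_points_with_cost.py | dp_iter2
-- ===== SOURCE A (Python) =====
-- from typing import List
--
-- def dp_iter2(points: List[List[int]]) -> int:
--     # Time complexity: O(r * 4c + c) = O(rc)
--     # Space complexity: O(c)
--     rows, cols = len(points), len(points[0])
--     if rows == 1:
--         return max(points[0])
--
--     prev = points[0]
--     for r in range(1, rows):
--
--         # Max of previous row comming from the left
--         left = [prev[0]]
--         for c in range(1, cols):
--             left.append(max(left[-1] - 1, prev[c]))
--
--         # Max of previous row comming from the right
--         right = [0] * (cols - 1) + [prev[-1]]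
--         for c in range(cols - 2, -1, -1):
--             right[c] = max(right[c + 1] - 1, prev[c])
--
--         # Max of current row
--         curr = []
--         for c in range(cols):
--             curr.append(points[r][c] + max(left[c], right[c]))
--
--         prev = curr
--
--     return max(curr)
-- ===== SOURCE B (Python) =====
-- def dp_iter2(points):
--     # Direct DP recurrence: value at (r, c) = points[r][c] + max over all
--     # previous-row columns j of prev[j] - |c - j|.  No running-max sweeps.
--     cols = len(points[0])
--     prev = points[0]
--     for row in points[1:]:
--         prev = [row[c] + max(prev[j] - abs(c - j) for j in range(cols))
--                 for c in range(cols)]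
--     return max(prev)
-- ===== Notes on version B (the rewrite author's own statement) =====
-- stated objective: simpler
-- what changed: B drops A's left/right running-max sweep arrays entirely and computes the DP recurrence directly: each cell is points[r][c] plus the maximum over all previous-row columns j of prev[j] - |c - j| (an inner scan per cell), trading A's O(r*c) sweeps for a plainer O(r*c^2) direct formulation.
-- outside the precondition, e.g. on dp_iter2([]): A raises IndexError, B raises IndexError; on dp_iter2([[]]): A raises ValueError, B raises ValueError; on dp_iter2([[1, 2], [3]]): A raises IndexError, B raises IndexError
import Mathlib
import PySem

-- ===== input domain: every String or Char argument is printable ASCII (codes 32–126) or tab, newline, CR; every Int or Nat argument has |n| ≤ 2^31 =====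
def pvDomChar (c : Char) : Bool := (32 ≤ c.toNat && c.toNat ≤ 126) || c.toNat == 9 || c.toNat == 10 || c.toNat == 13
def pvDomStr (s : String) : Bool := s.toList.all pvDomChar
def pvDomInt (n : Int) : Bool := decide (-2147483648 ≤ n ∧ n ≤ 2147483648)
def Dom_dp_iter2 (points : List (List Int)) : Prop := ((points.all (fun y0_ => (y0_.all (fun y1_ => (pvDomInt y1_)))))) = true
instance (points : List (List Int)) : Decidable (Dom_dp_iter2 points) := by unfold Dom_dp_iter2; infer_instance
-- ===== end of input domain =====

-- B drops A's left/right running-max sweep arrays and computes the DP recurrence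
-- directly: each cell is points[r][c] + max over all j of prev[j] - |c - j| (objective: simpler).

-- ===== PORT A =====
-- left = [prev[0]]; for c in range(1, cols): left.append(max(left[-1] - 1, prev[c]))
def dpA_left (prev : List Int) (cols : Nat) : List Int :=
  (List.range' 1 (cols - 1)).foldl
    (fun l (c : Nat) => l ++ [max (PySem.List.pyGetD l (-1) 0 - 1) (PySem.List.pyGetD prev (c : Int) 0)])
    [PySem.List.pyGetD prev 0 0]

-- for c in range(cols - 2, -1, -1): right[c] = max(right[c + 1] - 1, prev[c]) ; fuel k runs index k-1 first
def dpA_rightLoop (prev : List Int) (rt : List Int) : Nat → List Int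
  | 0 => rt
  | k + 1 =>
      dpA_rightLoop prev
        (PySem.List.pySetD rt (k : Int)
          (max (PySem.List.pyGetD rt ((k : Int) + 1) 0 - 1) (PySem.List.pyGetD prev (k : Int) 0))) k

-- right = [0] * (cols - 1) + [prev[-1]], then the backward loop
def dpA_right (prev : List Int) (cols : Nat) : List Int :=
  dpA_rightLoop prev (List.replicate (cols - 1) 0 ++ [PySem.List.pyGetD prev (-1) 0]) (cols - 1)

def dp_iter2 (points : List (List Int)) : Int :=
  let rows := points.length
  let cols := (PySem.List.pyGetD points 0 []).length
  if rows = 1 then (PySem.List.max? (PySem.List.pyGetD points 0 []) (fun y => y)).getD 0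
  else
    let curr :=
      (List.range' 1 (rows - 1)).foldl
        (fun prev (r : Nat) =>
          let row := PySem.List.pyGetD points (r : Int) []
          let left := dpA_left prev cols
          let right := dpA_right prev cols
          (List.range cols).map (fun (c : Nat) =>
            PySem.List.pyGetD row (c : Int) 0 +
              max (PySem.List.pyGetD left (c : Int) 0) (PySem.List.pyGetD right (c : Int) 0)))
        (PySem.List.pyGetD points 0 [])
    (PySem.List.max? curr (fun y => y)).getD 0

-- ===== PORT B =====
-- prev = [row[c] + max(prev[j] - abs(c - j) for j in range(cols)) for c in range(cols)]
def dpB_row (cols : Nat) (prev row : List Int) : List Int :=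
  (List.range cols).map (fun (c : Nat) =>
    PySem.List.pyGetD row (c : Int) 0 +
      ((PySem.List.max? ((List.range cols).map (fun (j : Nat) =>
          PySem.List.pyGetD prev (j : Int) 0 - |(c : Int) - (j : Int)|)) (fun y => y)).getD 0))

def dp_iter2_alt (points : List (List Int)) : Int :=
  let cols := (PySem.List.pyGetD points 0 []).length
  let prev :=
    (PySem.List.slice points (some 1) none).foldl (fun prev row => dpB_row cols prev row)
      (PySem.List.pyGetD points 0 [])
  (PySem.List.max? prev (fun y => y)).getD 0

-- ===== PRECONDITION & SPEC =====
-- Pre_ excludes exactly the inputs on which Python A raises: an empty outer list or an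
-- empty first row (IndexError/ValueError on max([])), and rows shorter than the first row
-- (IndexError on points[r][c]).
def Pre_dp_iter2 (points : List (List Int)) : Prop :=
  points ≠ [] ∧ 0 < (points.headD []).length ∧
    (points.all (fun row => (points.headD []).length ≤ row.length)) = true
instance (points : List (List Int)) : Decidable (Pre_dp_iter2 points) := by
  unfold Pre_dp_iter2; infer_instance

def pvWitness_dp_iter2 : List (List Int) := [[1, 2, 3], [4, -1, 0]]

def Spec_dp_iter2 (points : List (List Int)) (out : Int) : Prop := out = dp_iter2_alt points
instance (points : List (List Int)) (out : Int) : Decidable (Spec_dp_iter2 points out) := by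
  unfold Spec_dp_iter2; infer_instance

-- ===== CLAIM (what is proved, stated in full; the proofs are below) =====
def Claim_equal_dp_iter2 : Prop :=
  ∀ (points : List (List Int)), Dom_dp_iter2 points → Pre_dp_iter2 points →
    Spec_dp_iter2 points (dp_iter2 points)

-- ===== LEMMAS AND PROOFS =====

-- best value at column c reachable from the left in the previous row
def leftF (prev : List Int) : Nat → Int
  | 0 => prev.getD 0 0
  | c + 1 => max (leftF prev c - 1) (prev.getD (c + 1) 0)

-- best value reachable from the right, indexed by distance k from the last column
def rightF (prev : List Int) (cols : Nat) : Nat → Int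
  | 0 => prev.getD (cols - 1) 0
  | k + 1 => max (rightF prev cols k - 1) (prev.getD (cols - 2 - k) 0)

-- max of f over 0..n
def maxSeg (f : Nat → Int) : Nat → Int
  | 0 => f 0
  | n + 1 => max (maxSeg f n) (f (n + 1))

theorem le_maxSeg (f : Nat → Int) : ∀ n j, j ≤ n → f j ≤ maxSeg f n := by
  intro n
  induction n with
  | zero =>
      intro j h
      have hj0 : j = 0 := Nat.le_zero.mp h
      rw [hj0]
      simp only [maxSeg]
      exact le_refl _
  | succ m ih =>
      intro j h
      by_cases hj : j ≤ m
      · have := ih j hj; simp only [maxSeg]; omega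
      · have : j = m + 1 := by omega
        subst this; simp [maxSeg]

theorem maxSeg_attained (f : Nat → Int) : ∀ n, ∃ j, j ≤ n ∧ maxSeg f n = f j := by
  intro n
  induction n with
  | zero => exact ⟨0, le_refl 0, rfl⟩
  | succ m ih =>
      obtain ⟨j, hj, hv⟩ := ih
      by_cases h : maxSeg f m ≤ f (m + 1)
      · exact ⟨m + 1, le_refl _, by simp only [maxSeg]; omega⟩
      · exact ⟨j, by omega, by simp only [maxSeg]; omega⟩

theorem leftF_eq_maxSeg (prev : List Int) :
    ∀ c, leftF prev c = maxSeg (fun j => prev.getD j 0 + (j : Int)) c - (c : Int) := by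
  intro c
  induction c with
  | zero => simp [leftF, maxSeg]
  | succ m ih =>
      simp only [leftF, maxSeg, ih]
      push_cast
      omega

theorem rightF_eq_maxSeg (prev : List Int) (cols : Nat) :
    ∀ k, k + 1 ≤ cols →
      rightF prev cols k = maxSeg (fun d => prev.getD (cols - 1 - d) 0 + (d : Int)) k - (k : Int) := by
  intro k
  induction k with
  | zero => intro _; simp [rightF, maxSeg]
  | succ m ih =>
      intro hk
      have e : cols - 2 - m = cols - 1 - (m + 1) := by omega
      simp only [rightF, maxSeg, ih (by omega), e]
      push_cast
      omega

theorem foldl_max_maxSeg (g : Nat → Int) :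
    ∀ n, List.foldl max (g 0) ((List.range' 1 n).map g) = maxSeg g n := by
  intro n
  induction n with
  | zero => simp [maxSeg]
  | succ m ih =>
      rw [List.range'_1_concat, List.map_append, List.foldl_append, ih]
      simp only [List.map_cons, List.map_nil, List.foldl_cons, List.foldl_nil, maxSeg]
      rw [show 1 + m = m + 1 from by omega]

-- max() over the generated list equals maxSeg of the generating function
theorem max_over_range (g : Nat → Int) (n : Nat) :
    ((PySem.List.max? ((List.range (n + 1)).map g) (fun y => y)).getD 0) = maxSeg g n := by
  have hr : List.range (n + 1) = 0 :: List.range' 1 n := by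
    rw [List.range_eq_range', List.range'_succ]
  rw [hr]
  simp only [List.map_cons, PySem.List.max?_id_cons, Option.getD_some]
  exact foldl_max_maxSeg g n

-- the direct per-cell maximum equals A's combined left/right sweep value
theorem brute_eq (prev : List Int) (cols c : Nat) (hp : prev.length = cols) (hc : c < cols) :
    ((PySem.List.max? ((List.range cols).map (fun (j : Nat) =>
        PySem.List.pyGetD prev (j : Int) 0 - |(c : Int) - (j : Int)|)) (fun y => y)).getD 0) =
      max (leftF prev c) (rightF prev cols (cols - 1 - c)) := by
  obtain ⟨n, rfl⟩ : ∃ n, cols = n + 1 := ⟨cols - 1, by omega⟩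
  have hgd : ∀ j : Nat, PySem.List.pyGetD prev (j : Int) 0 = prev.getD j 0 := by
    intro j; rw [PySem.List.pyGetD_natCast]
  rw [max_over_range]
  set f : Nat → Int := fun j => PySem.List.pyGetD prev (j : Int) 0 - |(c : Int) - (j : Int)| with hf
  have habs : ∀ j : Nat, f j = prev.getD j 0 - |(c : Int) - (j : Int)| := by
    intro j; simp only [hf, hgd]
  have hL := leftF_eq_maxSeg prev c
  have hR := rightF_eq_maxSeg prev (n + 1) (n - c) (by omega)
  have hnc : n + 1 - 1 - c = n - c := by omega
  rw [hnc]
  -- ≤ : every f j is below one of the two sides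
  refine le_antisymm ?_ ?_
  · obtain ⟨j, hj, hv⟩ := maxSeg_attained f n
    rw [hv, habs]
    by_cases hjc : j ≤ c
    · have h1 : prev.getD j 0 + (j : Int) ≤ maxSeg (fun j => prev.getD j 0 + (j : Int)) c :=
        le_maxSeg _ c j hjc
      have h2 : |(c : Int) - (j : Int)| = (c : Int) - (j : Int) := by
        rw [abs_of_nonneg (by omega)]
      rw [h2]
      have := hL
      omega
    · have hd : n + 1 - 1 - j ≤ n - c := by omega
      have h1 : prev.getD (n + 1 - 1 - (n + 1 - 1 - j)) 0 + ((n + 1 - 1 - j : Nat) : Int) ≤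
          maxSeg (fun d => prev.getD (n + 1 - 1 - d) 0 + (d : Int)) (n - c) :=
        le_maxSeg _ (n - c) (n + 1 - 1 - j) hd
      have he : n + 1 - 1 - (n + 1 - 1 - j) = j := by omega
      rw [he] at h1
      have h2 : |(c : Int) - (j : Int)| = (j : Int) - (c : Int) := by
        rw [abs_of_nonpos (by omega)]; ring
      rw [h2]
      have hcast : ((n + 1 - 1 - j : Nat) : Int) = (n : Int) - (j : Int) := by push_cast; omega
      rw [hcast] at h1
      have hcast2 : ((n - c : Nat) : Int) = (n : Int) - (c : Int) := by push_cast; omega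
      rw [hcast2] at hR
      have := hR
      omega
  · -- ≥ : each side is achieved by some f j
    apply max_le
    · obtain ⟨j, hj, hv⟩ := maxSeg_attained (fun j => prev.getD j 0 + (j : Int)) c
      have h1 : f j ≤ maxSeg f n := le_maxSeg f n j (by omega)
      have h2 : |(c : Int) - (j : Int)| = (c : Int) - (j : Int) := by
        rw [abs_of_nonneg]; omega
      rw [habs, h2] at h1
      omega
    · obtain ⟨d, hd, hv⟩ := maxSeg_attained (fun d => prev.getD (n + 1 - 1 - d) 0 + (d : Int)) (n - c)
      have hj : n + 1 - 1 - d ≤ n := by omega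
      have h1 : f (n + 1 - 1 - d) ≤ maxSeg f n := le_maxSeg f n _ hj
      have h2 : |(c : Int) - ((n + 1 - 1 - d : Nat) : Int)| = ((n + 1 - 1 - d : Nat) : Int) - (c : Int) := by
        rw [abs_of_nonpos (by omega)]; ring
      rw [habs, h2] at h1
      have hcast : ((n + 1 - 1 - d : Nat) : Int) = (n : Int) - (d : Int) := by push_cast; omega
      have hcast2 : ((n - c : Nat) : Int) = (n : Int) - (c : Int) := by push_cast; omega
      rw [hcast] at h1
      rw [hcast2] at hR
      omega

theorem getD_map_range (f : Nat → Int) (n k : Nat) (h : k < n) :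
    ((List.range n).map f).getD k 0 = f k := by
  rw [List.getD_eq_getElem?_getD]; simp [h]

theorem pyGetD_map_range (f : Nat → Int) (n k : Nat) (h : k < n) :
    PySem.List.pyGetD ((List.range n).map f) (k : Int) 0 = f k := by
  rw [PySem.List.pyGetD_natCast]; exact getD_map_range f n k h

theorem set_map_range (f g : Nat → Int) (n k : Nat) (v : Int) (_hk : k < n) (hv : v = g k)
    (hf : ∀ j, j < n → j ≠ k → f j = g j) :
    ((List.range n).map f).set k v = (List.range n).map g := by
  apply List.ext_getElem
  · simp
  · intro i h1 h2
    simp only [List.length_set, List.length_map, List.length_range] at h1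
    rw [List.getElem_set]
    by_cases hik : k = i
    · subst hik; simpa using hv
    · simp only [hik, if_false]
      simp only [List.getElem_map, List.getElem_range]
      exact hf i h1 (fun he => hik he.symm)

theorem dpA_left_gen (prev : List Int) :
    ∀ k : Nat,
      (List.range' 1 k).foldl
        (fun l (c : Nat) => l ++ [max (PySem.List.pyGetD l (-1) 0 - 1) (PySem.List.pyGetD prev (c : Int) 0)])
        [PySem.List.pyGetD prev 0 0] = (List.range (k + 1)).map (leftF prev) := by
  intro k
  induction k with
  | zero => simp [leftF, PySem.List.pyGetD_zero]
  | succ m ih =>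
      rw [List.range'_1_concat, List.foldl_append, ih, List.foldl_cons, List.foldl_nil]
      have hne : (List.range (m + 1)).map (leftF prev) ≠ [] := by simp
      have hlast : PySem.List.pyGetD ((List.range (m + 1)).map (leftF prev)) (-1) 0 = leftF prev m := by
        rw [PySem.List.pyGetD_neg_one (h := hne), List.getLast_eq_getElem]
        simp
      rw [hlast, show List.range (m + 1 + 1) = List.range (m + 1) ++ [m + 1] from List.range_succ,
        List.map_append]
      simp only [PySem.List.pyGetD_natCast, List.map_cons, List.map_nil]
      have helem : max (leftF prev m - 1) (prev.getD (1 + m) 0) = leftF prev (m + 1) := by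
        rw [Nat.add_comm 1 m]; rfl
      rw [helem]

theorem dpA_left_eq (prev : List Int) (cols : Nat) (hc : 1 ≤ cols) :
    dpA_left prev cols = (List.range cols).map (leftF prev) := by
  unfold dpA_left
  have h := dpA_left_gen prev (cols - 1)
  rw [h, show cols - 1 + 1 = cols from by omega]

theorem rightLoop_spec (prev : List Int) (cols : Nat) (hc : 1 ≤ cols) :
    ∀ k, k ≤ cols - 1 →
      dpA_rightLoop prev
          ((List.range cols).map (fun j => if j < k then 0 else rightF prev cols (cols - 1 - j))) k =
        (List.range cols).map (fun j => rightF prev cols (cols - 1 - j)) := by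
  intro k
  induction k with
  | zero => simp [dpA_rightLoop]
  | succ m ih =>
      intro hm
      show dpA_rightLoop prev (PySem.List.pySetD _ ((m : Nat) : Int) _) m = _
      rw [PySem.List.pySetD_natCast]
      have hget : PySem.List.pyGetD
          ((List.range cols).map (fun j => if j < m + 1 then 0 else rightF prev cols (cols - 1 - j)))
          ((m : Int) + 1) 0 = rightF prev cols (cols - 2 - m) := by
        rw [show ((m : Int) + 1) = ((m + 1 : Nat) : Int) from by push_cast; ring]
        rw [pyGetD_map_range _ cols (m + 1) (by omega)]
        simp only [Nat.lt_irrefl, if_false]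
        rw [show cols - 1 - (m + 1) = cols - 2 - m from by omega]
      rw [hget, PySem.List.pyGetD_natCast]
      have hv : max (rightF prev cols (cols - 2 - m) - 1) (prev.getD m 0) =
          rightF prev cols (cols - 1 - m) := by
        rw [show cols - 1 - m = (cols - 2 - m) + 1 from by omega]
        show _ = max (rightF prev cols (cols - 2 - m) - 1) (prev.getD (cols - 2 - (cols - 2 - m)) 0)
        rw [show cols - 2 - (cols - 2 - m) = m from by omega]
      rw [hv]
      rw [set_map_range _ (fun j => if j < m then 0 else rightF prev cols (cols - 1 - j)) cols m _
        (by omega) (by simp) (by intro j _ hj; by_cases h : j < m + 1 <;> by_cases h2 : j < m <;>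
          simp_all <;> omega)]
      exact ih (by omega)

theorem dpA_right_eq (prev : List Int) (cols : Nat) (hp : prev.length = cols) (hc : 1 ≤ cols) :
    dpA_right prev cols = (List.range cols).map (fun j => rightF prev cols (cols - 1 - j)) := by
  unfold dpA_right
  have hne : prev ≠ [] := by intro h; rw [h] at hp; simp at hp; omega
  have hinit : List.replicate (cols - 1) (0 : Int) ++ [PySem.List.pyGetD prev (-1) 0] =
      (List.range cols).map (fun j => if j < cols - 1 then 0 else rightF prev cols (cols - 1 - j)) := by
    apply List.ext_getElem
    · simp; omega
    · intro i h1 h2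
      simp only [List.length_append, List.length_replicate, List.length_cons, List.length_nil] at h1
      simp only [List.getElem_map, List.getElem_range]
      by_cases hi : i < cols - 1
      · rw [List.getElem_append_left (by simpa using hi)]
        simp [hi]
      · have hie : i = cols - 1 := by omega
        rw [List.getElem_append_right (by simpa using hi)]
        subst hie
        simp only [Nat.lt_irrefl, if_false, List.length_replicate, Nat.sub_self]
        show PySem.List.pyGetD prev (-1) 0 = rightF prev cols 0
        rw [PySem.List.pyGetD_neg_one (h := hne)]
        rw [List.getLast_eq_getElem, rightF]
        rw [List.getD_eq_getElem?_getD, List.getElem?_eq_getElem (by omega)]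
        simp [hp]
  rw [hinit, rightLoop_spec prev cols hc (cols - 1) (le_refl _)]

-- one row of A equals one row of B
theorem step_eq (cols : Nat) (prev row : List Int) (hp : prev.length = cols) :
    (List.range cols).map (fun (c : Nat) =>
        PySem.List.pyGetD row (c : Int) 0 +
          max (PySem.List.pyGetD (dpA_left prev cols) (c : Int) 0)
            (PySem.List.pyGetD (dpA_right prev cols) (c : Int) 0)) =
      dpB_row cols prev row := by
  by_cases hc : 1 ≤ cols
  · unfold dpB_row
    rw [dpA_left_eq prev cols hc, dpA_right_eq prev cols hp hc]
    apply List.map_congr_left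
    intro c hcc
    rw [List.mem_range] at hcc
    rw [pyGetD_map_range _ cols c hcc, pyGetD_map_range _ cols c hcc]
    rw [brute_eq prev cols c hp hcc]
  · have : cols = 0 := by omega
    subst this
    simp [dpB_row]

theorem foldl_range'_pyGetD {β : Type} (xs : List (List Int)) (g : β → List Int → β) :
    ∀ (n j : Nat) (init : β), n = xs.length - j →
      (List.range' j n).foldl (fun p (r : Nat) => g p (PySem.List.pyGetD xs (r : Int) [])) init =
        (xs.drop j).foldl g init := by
  intro n
  induction n with
  | zero =>
      intro j init h
      have : xs.drop j = [] := List.drop_eq_nil_of_le (by omega)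
      simp [this]
  | succ m ih =>
      intro j init h
      have hj : j < xs.length := by omega
      rw [List.range'_succ, List.drop_eq_getElem_cons hj]
      simp only [List.foldl_cons]
      rw [ih (j + 1) _ (by omega)]
      congr 1
      simp [PySem.List.pyGetD_natCast, List.getD_eq_getElem?_getD, List.getElem?_eq_getElem hj]

theorem fold_rows_eq (cols : Nat) :
    ∀ (tail : List (List Int)) (prev : List Int), prev.length = cols →
      tail.foldl
        (fun prev row =>
          (List.range cols).map (fun (c : Nat) =>
            PySem.List.pyGetD row (c : Int) 0 +
              max (PySem.List.pyGetD (dpA_left prev cols) (c : Int) 0)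
                (PySem.List.pyGetD (dpA_right prev cols) (c : Int) 0))) prev =
      tail.foldl (fun prev row => dpB_row cols prev row) prev := by
  intro tail
  induction tail with
  | nil => intro prev _; rfl
  | cons r t ih =>
      intro prev hp
      simp only [List.foldl_cons]
      rw [step_eq cols prev r hp, ih _ (by simp [dpB_row])]

-- ===== VERDICT (by name: the statement is the Claim_ definition above) =====
theorem dp_iter2_spec : Claim_equal_dp_iter2 := by
  intro points _ _
  unfold Spec_dp_iter2 dp_iter2 dp_iter2_alt
  by_cases h1 : points.length = 1
  · simp only [h1, if_pos]
    obtain ⟨x, rfl⟩ := List.length_eq_one_iff.mp h1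
    rw [PySem.List.slice_from_one]
    simp
  · simp only [h1, if_false]
    rw [PySem.List.slice_from_one, ← List.drop_one]
    rw [foldl_range'_pyGetD points
      (fun prev row =>
        (List.range ((PySem.List.pyGetD points 0 []).length)).map (fun (c : Nat) =>
          PySem.List.pyGetD row (c : Int) 0 +
            max (PySem.List.pyGetD (dpA_left prev ((PySem.List.pyGetD points 0 []).length)) (c : Int) 0)
              (PySem.List.pyGetD (dpA_right prev ((PySem.List.pyGetD points 0 []).length)) (c : Int) 0)))
      (points.length - 1) 1 _ rfl]
    rw [fold_rows_eq ((PySem.List.pyGetD points 0 []).length) (points.drop 1) _ rfl]
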